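-- pv_equiv track=rewrite | github.com/m34959203/ai_trader | news/rss_client.py | _impact_score
-- ===== SOURCE A (Python) =====
-- from typing import List, Dict, Any, Optional, Iterable, Tuple
--
-- IMPACT_KEYWORDS: List[Tuple[str, int]] = [
--     ("FOMC", 5), ("rate hike", 5), ("rate cut", 5), ("interest rate", 5),
--     ("CPI", 5), ("NFP", 5), ("nonfarm payroll", 5), ("PPI", 4),
--     ("ETF approval", 5), ("SEC", 4), ("lawsuit", 4),
--     ("hack", 5), ("exploit", 4), ("downtime", 3),
--     ("inflation", 4), ("recession", 4), ("liquidation", 3),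
--     ("blackrock", 3), ("spot etf", 4),
--     ("binance", 2), ("coinbase", 2), ("okx", 2), ("kraken", 2),
--     ("fed", 4), ("ecb", 3), ("boj", 3),
-- ]
--
-- def _impact_score(text: str) -> int:
--     t = text.lower()
--     score = 0
--     for kw, w in IMPACT_KEYWORDS:
--         if kw.lower() in t:
--             score = max(score, w)  # берём максимум, а не сумму (чтобы не раздувать)
--     # простая эвристика: "breaking" → высокий сигнал
--     if "breaking" in t or "urgent" in t:
--         score = max(score, 5)
--     return score
-- ===== SOURCE B (Python) =====
-- # keywords grouped into weight tiers (pre-lowercased, "breaking"/"urgent"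
-- # folded into tier 5); scan tiers from the heaviest down, return the first
-- # tier any of whose keywords occurs in the text.
-- _TIERS = [
--     (5, ("fomc", "rate hike", "rate cut", "interest rate", "cpi", "nfp",
--          "nonfarm payroll", "etf approval", "hack", "breaking", "urgent")),
--     (4, ("ppi", "sec", "lawsuit", "exploit", "inflation", "recession",
--          "spot etf", "fed")),
--     (3, ("downtime", "liquidation", "blackrock", "ecb", "boj")),
--     (2, ("binance", "coinbase", "okx", "kraken")),
-- ]
--
-- def _impact_score(text: str) -> int:
--     t = text.lower()
--     for w, kws in _TIERS:
--         if any(k in t for k in kws):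
--             return w
--     return 0
-- ===== Notes on version B (the rewrite author's own statement) =====
-- stated objective: alternative
-- what changed: Replaced A's flat max-accumulation fold over a (keyword, weight) list plus a trailing breaking/urgent heuristic by a tiered table grouping pre-lowercased keywords by weight (heuristic folded into tier 5), scanned from the heaviest tier down with any() and an early return.
import Mathlib
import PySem

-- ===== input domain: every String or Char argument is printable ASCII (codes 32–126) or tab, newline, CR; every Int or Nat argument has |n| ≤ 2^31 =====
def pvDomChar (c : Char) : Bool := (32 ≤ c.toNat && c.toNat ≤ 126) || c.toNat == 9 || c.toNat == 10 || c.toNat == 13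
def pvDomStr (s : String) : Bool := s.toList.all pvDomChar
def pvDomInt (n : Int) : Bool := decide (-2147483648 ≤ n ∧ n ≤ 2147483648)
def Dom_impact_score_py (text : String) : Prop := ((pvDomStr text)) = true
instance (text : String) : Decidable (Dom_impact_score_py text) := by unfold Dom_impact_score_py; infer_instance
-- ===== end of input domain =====

-- B replaces A's flat max-accumulation fold (plus a trailing breaking/urgent heuristic)
-- by a weight-tiered table scanned from the heaviest tier down with an early return.

-- ===== PORT A =====
def impactKeywords : List (String × Int) := [
  ("FOMC", 5), ("rate hike", 5), ("rate cut", 5), ("interest rate", 5),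
  ("CPI", 5), ("NFP", 5), ("nonfarm payroll", 5), ("PPI", 4),
  ("ETF approval", 5), ("SEC", 4), ("lawsuit", 4),
  ("hack", 5), ("exploit", 4), ("downtime", 3),
  ("inflation", 4), ("recession", 4), ("liquidation", 3),
  ("blackrock", 3), ("spot etf", 4),
  ("binance", 2), ("coinbase", 2), ("okx", 2), ("kraken", 2),
  ("fed", 4), ("ecb", 3), ("boj", 3)]

def impact_score_py (text : String) : Int :=
  let t := PySem.Str.lower text
  let score := impactKeywords.foldl
    (fun score p => if PySem.Str.isIn (PySem.Str.lower p.1) t then max score p.2 else score) 0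
  if PySem.Str.isIn "breaking" t || PySem.Str.isIn "urgent" t then max score 5 else score

-- ===== PORT B =====
-- keywords grouped by weight, heaviest tier first, heuristic words folded into tier 5
def impactTiers : List (Int × List String) := [
  (5, ["fomc", "rate hike", "rate cut", "interest rate", "cpi", "nfp",
       "nonfarm payroll", "etf approval", "hack", "breaking", "urgent"]),
  (4, ["ppi", "sec", "lawsuit", "exploit", "inflation", "recession",
       "spot etf", "fed"]),
  (3, ["downtime", "liquidation", "blackrock", "ecb", "boj"]),
  (2, ["binance", "coinbase", "okx", "kraken"])]

def tierScore (t : String) : List (Int × List String) → Int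
  | [] => 0
  | (w, kws) :: rest =>
      if kws.any (fun k => PySem.Str.isIn k t) then w else tierScore t rest

def impact_score_py_alt (text : String) : Int :=
  tierScore (PySem.Str.lower text) impactTiers

-- ===== PRECONDITION & SPEC =====
def Spec_impact_score_py (text : String) (out : Int) : Prop := out = impact_score_py_alt text
instance (text : String) (out : Int) : Decidable (Spec_impact_score_py text out) := by unfold Spec_impact_score_py; infer_instance

-- ===== CLAIM (what is proved, stated in full; the proofs are below) =====
def Claim_equal_impact_score_py : Prop := ∀ (text : String), Dom_impact_score_py text → Spec_impact_score_py text (impact_score_py text)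

-- ===== LEMMAS AND PROOFS =====

-- the accumulation step of A's loop, with the membership test on a fixed lowered text
def maxStep (t : String) (s : Int) (p : String × Int) : Int :=
  if PySem.Str.isIn p.1 t then max s p.2 else s

lemma maxStep_rcomm (t : String) (s : Int) (p q : String × Int) :
    maxStep t (maxStep t s p) q = maxStep t (maxStep t s q) p := by
  unfold maxStep
  split_ifs <;> simp [max_comm, max_left_comm]

-- if the accumulator already dominates every remaining weight, A's loop leaves it unchanged
lemma foldl_maxStep_const (t : String) (l : List (String × Int)) (a : Int)
    (h : ∀ x ∈ l, x.2 ≤ a) : l.foldl (maxStep t) a = a := by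
  induction l with
  | nil => rfl
  | cons x xs ih =>
    have hx : x.2 ≤ a := h x (List.mem_cons_self ..)
    have : maxStep t a x = a := by
      unfold maxStep; split_ifs <;> simp [max_eq_left hx]
    rw [List.foldl_cons, this]
    exact ih fun y hy => h y (List.mem_cons_of_mem _ hy)

-- A's fold over one tier's keywords, all carrying the same weight
lemma foldl_maxStep_tier (t : String) (kws : List String) (w a : Int) :
    (kws.map (fun k => (k, w))).foldl (maxStep t) a
      = if kws.any (fun k => PySem.Str.isIn k t) then max a w else a := by
  induction kws generalizing a with
  | nil => simp
  | cons k ks ih =>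
    rw [List.map_cons, List.foldl_cons, ih, List.any_cons]
    by_cases h : PySem.Str.isIn k t <;> by_cases h2 : ks.any (fun k => PySem.Str.isIn k t)
    · have hm : maxStep t a (k, w) = max a w := by unfold maxStep; rw [if_pos h]
      rw [if_pos h2, hm, if_pos (by simp only [Bool.or_eq_true]; exact Or.inl h), max_assoc, max_self]
    · have hm : maxStep t a (k, w) = max a w := by unfold maxStep; rw [if_pos h]
      rw [if_neg h2, hm, if_pos (by simp only [Bool.or_eq_true]; exact Or.inl h)]
    · have hm : maxStep t a (k, w) = a := by unfold maxStep; rw [if_neg h]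
      rw [if_pos h2, hm, if_pos (by simp only [Bool.or_eq_true]; exact Or.inr h2)]
    · have hm : maxStep t a (k, w) = a := by unfold maxStep; rw [if_neg h]
      rw [if_neg h2, hm, if_neg (by simp only [Bool.or_eq_true, not_or]; exact ⟨h, h2⟩)]

-- the flattened tier table: each tier's keywords paired with its weight
def flatTiers (l : List (Int × List String)) : List (String × Int) :=
  l.flatMap (fun p => p.2.map (fun k => (k, p.1)))

-- on a weight-descending, nonnegative tier table, B's early-return tier scan
-- computes A's max fold over the flattened table
lemma tierScore_eq_foldl (t : String) (l : List (Int × List String))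
    (hs : l.Pairwise (fun a b => b.1 ≤ a.1)) (hn : ∀ x ∈ l, 0 ≤ x.1) :
    tierScore t l = (flatTiers l).foldl (maxStep t) 0 := by
  induction l with
  | nil => rfl
  | cons x xs ih =>
    obtain ⟨w, kws⟩ := x
    have hw0 : (0 : Int) ≤ w := hn (w, kws) (List.mem_cons_self ..)
    have hdom : ∀ y ∈ xs, y.1 ≤ w := (List.pairwise_cons.mp hs).1
    have hrest : ∀ y ∈ flatTiers xs, y.2 ≤ w := by
      intro y hy
      simp only [flatTiers, List.mem_flatMap, List.mem_map] at hy
      obtain ⟨p, hp, k, _, rfl⟩ := hy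
      exact hdom p hp
    show (if kws.any (fun k => PySem.Str.isIn k t) then w else tierScore t xs) = _
    rw [flatTiers, List.flatMap_cons, List.foldl_append, foldl_maxStep_tier]
    by_cases h : kws.any (fun k => PySem.Str.isIn k t)
    · rw [if_pos h, if_pos h, max_eq_right hw0]
      exact (foldl_maxStep_const t (flatTiers xs) w hrest).symm
    · rw [if_neg h, if_neg h]
      exact ih (List.pairwise_cons.mp hs).2 fun y hy => hn y (List.mem_cons_of_mem _ hy)

-- the lowered A-table followed by the heuristic pairs is a permutation of the flattened tiers
lemma perm_tables :
    (impactKeywords.map (fun p : String × Int => (PySem.Str.lower p.1, p.2))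
        ++ [("breaking", 5), ("urgent", 5)]).Perm (flatTiers impactTiers) := by decide

lemma tiers_sorted : impactTiers.Pairwise (fun a b => b.1 ≤ a.1) := by decide

lemma tiers_nonneg : ∀ x ∈ impactTiers, (0 : Int) ≤ x.1 := by decide

lemma key_eq (t : String) :
    (if PySem.Str.isIn "breaking" t || PySem.Str.isIn "urgent" t then
       max (impactKeywords.foldl (fun s p => if PySem.Str.isIn (PySem.Str.lower p.1) t then max s p.2 else s) 0) 5
     else impactKeywords.foldl (fun s p => if PySem.Str.isIn (PySem.Str.lower p.1) t then max s p.2 else s) 0)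
      = tierScore t impactTiers := by
  haveI : RightCommutative (maxStep t) := ⟨fun s p q => maxStep_rcomm t s p q⟩
  rw [tierScore_eq_foldl t impactTiers tiers_sorted tiers_nonneg,
      ← List.Perm.foldl_eq perm_tables 0, List.foldl_append, List.foldl_map]
  simp only [List.foldl_cons, List.foldl_nil, maxStep]
  split_ifs <;> simp_all

-- ===== VERDICT (by name: the statement is the Claim_ definition above) =====
theorem impact_score_py_spec : Claim_equal_impact_score_py := by
  intro text _
  unfold Spec_impact_score_py impact_score_py impact_score_py_alt
  exact key_eq (PySem.Str.lower text)
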